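-- pv_equiv track=rewrite | github.com/pp875/Talent-Hunt | backend/services/ranking_service.py | rank_profiles
-- ===== SOURCE A (Python) =====
-- def rank_profiles(profiles, jd):
--     jd = jd.lower()
--
--     scored = []
--
--     for link in profiles:
--         score = 0
--
--         # basic keyword scoring
--         if "java" in jd and "java" in link:
--             score += 2
--
--         if "spring" in jd and "spring" in link:
--             score += 2
--
--         if "developer" in link:
--             score += 1
--
--         scored.append((link, score))
--
--     # sort by score
--     scored.sort(key=lambda x: x[1], reverse=True)
--
--     return [item[0] for item in scored]
-- ===== SOURCE B (Python) =====
-- def rank_profiles(profiles, jd):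
--     jd = jd.lower()
--     jd_java = "java" in jd
--     jd_spring = "spring" in jd
--
--     # bucket (counting) sort: scores can only be 0..5
--     buckets = [[] for _ in range(6)]
--
--     for link in profiles:
--         score = ((2 if jd_java and "java" in link else 0)
--                  + (2 if jd_spring and "spring" in link else 0)
--                  + (1 if "developer" in link else 0))
--         buckets[score].append(link)
--
--     out = []
--     for bucket in reversed(buckets):
--         out.extend(bucket)
--     return out
-- ===== Notes on version B (the rewrite author's own statement) =====
-- stated objective: faster
-- what changed: Replaces the final reverse comparison sort with a counting/bucket sort over the bounded score range 0..5: one pass appends each profile to its score bucket in input order, then buckets are concatenated from score 5 down to 0, reproducing the stable descending order.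
import Mathlib
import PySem

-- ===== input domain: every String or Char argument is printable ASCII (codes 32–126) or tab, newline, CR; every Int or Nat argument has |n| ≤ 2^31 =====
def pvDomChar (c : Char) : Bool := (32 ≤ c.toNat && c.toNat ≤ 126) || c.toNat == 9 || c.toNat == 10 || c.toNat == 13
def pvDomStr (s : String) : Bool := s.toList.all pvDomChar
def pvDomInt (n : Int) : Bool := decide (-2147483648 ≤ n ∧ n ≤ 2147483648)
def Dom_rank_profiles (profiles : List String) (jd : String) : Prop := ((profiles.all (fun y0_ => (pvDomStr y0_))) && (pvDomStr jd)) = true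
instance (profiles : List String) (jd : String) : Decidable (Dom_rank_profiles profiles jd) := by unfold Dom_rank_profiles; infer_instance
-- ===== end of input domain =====

-- B replaces A's final reverse comparison sort by a counting/bucket sort over the
-- bounded score range 0..5 (one pass into buckets, concatenated high-to-low);
-- objective: a different (measured faster) algorithm with the same result, same stable tie order.

-- ===== PORT A =====
-- the sequential 'score = 0; if …: score += 2; …' body of A's loop
def pvScoreA (jd link : String) : Int :=
  let score : Int := 0
  let score := if PySem.Str.isIn "java" jd && PySem.Str.isIn "java" link then score + 2 else score
  let score := if PySem.Str.isIn "spring" jd && PySem.Str.isIn "spring" link then score + 2 else score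
  let score := if PySem.Str.isIn "developer" link then score + 1 else score
  score

def rank_profiles (profiles : List String) (jd : String) : List String :=
  let jd := PySem.Str.lower jd
  let scored := profiles.foldl (fun scored link => scored ++ [(link, pvScoreA jd link)]) []
  let scored := PySem.List.sorted scored (fun x => x.2) true
  scored.map (fun item => item.1)

-- ===== PORT B =====
-- Source B's conditional-expression sum
def pvScoreB (jdJava jdSpring : Bool) (link : String) : Int :=
  (if jdJava && PySem.Str.isIn "java" link then 2 else 0)
  + (if jdSpring && PySem.Str.isIn "spring" link then 2 else 0)
  + (if PySem.Str.isIn "developer" link then 1 else 0)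

-- buckets[i].append(x); exact for 0 ≤ i < buckets.length (here i is a score in 0..5)
def pvBump (bs : List (List String)) (i : Int) (x : String) : List (List String) :=
  match bs with
  | [] => []
  | b :: rest => if i = 0 then (b ++ [x]) :: rest else b :: pvBump rest (i - 1) x

def rank_profiles_alt (profiles : List String) (jd : String) : List String :=
  let jd := PySem.Str.lower jd
  let jdJava := PySem.Str.isIn "java" jd
  let jdSpring := PySem.Str.isIn "spring" jd
  let buckets : List (List String) := [[], [], [], [], [], []]
  let buckets := profiles.foldl
    (fun bs link => pvBump bs (pvScoreB jdJava jdSpring link) link) buckets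
  buckets.reverse.foldl (fun out bucket => out ++ bucket) []

-- ===== PRECONDITION & SPEC =====
def Spec_rank_profiles (profiles : List String) (jd : String) (out : List String) : Prop := out = rank_profiles_alt profiles jd
instance (profiles : List String) (jd : String) (out : List String) : Decidable (Spec_rank_profiles profiles jd out) := by unfold Spec_rank_profiles; infer_instance

-- ===== CLAIM (what is proved, stated in full; the proofs are below) =====
def Claim_equal_rank_profiles : Prop := ∀ (profiles : List String) (jd : String), Dom_rank_profiles profiles jd → Spec_rank_profiles profiles jd (rank_profiles profiles jd)

-- ===== LEMMAS AND PROOFS =====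

theorem pvScoreB_eq (jd link : String) :
    pvScoreB (PySem.Str.isIn "java" jd) (PySem.Str.isIn "spring" jd) link = pvScoreA jd link := by
  unfold pvScoreA pvScoreB
  dsimp only
  split_ifs <;> simp_all

theorem pvScoreA_range (jd link : String) :
    0 ≤ pvScoreA jd link ∧ pvScoreA jd link ≤ 5 := by
  unfold pvScoreA
  dsimp only
  split_ifs <;> omega

-- A's append loop builds the map
theorem foldl_append_map (jd : String) (profiles : List String)
    (init : List (String × Int)) :
    profiles.foldl (fun scored link => scored ++ [(link, pvScoreA jd link)]) init
      = init ++ profiles.map (fun link => (link, pvScoreA jd link)) := by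
  induction profiles generalizing init with
  | nil => simp
  | cons l t ih => simp [ih, List.append_assoc]

-- a stable insert passes over a block it does not go before
theorem insertBy_append_left {α : Type} (before : α → α → Bool) (x : α)
    (f rest : List α) (h : ∀ y ∈ f, before x y = false) :
    PySem.List.insertBy before x (f ++ rest) = f ++ PySem.List.insertBy before x rest := by
  induction f with
  | nil => simp
  | cons p ps ih =>
    have hp : before x p = false := h p (by simp)
    simp only [List.cons_append, PySem.List.insertBy, hp]
    simp [ih (fun y hy => h y (by simp [hy]))]

-- a stable insert lands in front of a block it goes before
theorem insertBy_front {α : Type} (before : α → α → Bool) (x : α)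
    (post : List α) (h : ∀ y ∈ post, before x y = true) :
    PySem.List.insertBy before x post = x :: post := by
  cases post with
  | nil => simp [PySem.List.insertBy]
  | cons p ps => simp [PySem.List.insertBy, h p (by simp)]

-- bucket i of a list of scored pairs
def pvB (i : Int) (ys : List (String × Int)) : List (String × Int) :=
  ys.filter (fun p => p.2 = i)

theorem pvB_append (i : Int) (ys : List (String × Int)) (x : String × Int) :
    pvB i (ys ++ [x]) = pvB i ys ++ (if x.2 = i then [x] else []) := by
  simp [pvB, List.filter_append]
  split_ifs <;> simp_all

theorem mem_pvB {i : Int} {ys : List (String × Int)} {y : String × Int}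
    (hy : y ∈ pvB i ys) : y.2 = i := by
  simpa [pvB] using (List.of_mem_filter hy)

-- the stable reverse sort of score-bounded pairs is the descending bucket concatenation
theorem sort_buckets (ys : List (String × Int))
    (h : ∀ p ∈ ys, 0 ≤ p.2 ∧ p.2 ≤ 5) :
    PySem.List.sorted ys (fun x => x.2) true
      = pvB 5 ys ++ pvB 4 ys ++ pvB 3 ys ++ pvB 2 ys ++ pvB 1 ys ++ pvB 0 ys := by
  rw [PySem.List.sorted_rev_eq_foldl_insertBy]
  induction ys using List.reverseRecOn with
  | nil => simp [pvB]
  | append_singleton ys x ih =>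
    have hys : ∀ p ∈ ys, 0 ≤ p.2 ∧ p.2 ≤ 5 := fun p hp => h p (by simp [hp])
    obtain ⟨hx0, hx5⟩ := h x (by simp)
    rw [List.foldl_append, List.foldl_cons, List.foldl_nil, ih hys]
    simp only [pvB_append]
    have hno : ∀ (j : Int), x.2 ≤ j → ∀ y ∈ pvB j ys,
        (decide (y.2 < x.2) : Bool) = false := by
      intro j hj y hy
      have := mem_pvB hy
      simp only [decide_eq_false_iff_not]; omega
    have hyes : ∀ (j : Int), j < x.2 → ∀ y ∈ pvB j ys,
        (decide (y.2 < x.2) : Bool) = true := by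
      intro j hj y hy
      have := mem_pvB hy
      simp only [decide_eq_true_eq]; omega
    have hcase : x.2 = 0 ∨ x.2 = 1 ∨ x.2 = 2 ∨ x.2 = 3 ∨ x.2 = 4 ∨ x.2 = 5 := by omega
    rcases hcase with h0 | h0 | h0 | h0 | h0 | h0
    · -- x.2 = 0 : skip every bucket, land at the very end
      simp only [h0, List.append_assoc]; norm_num
      rw [insertBy_append_left _ _ _ _ (fun y hy => hno 5 (by omega) y hy),
          insertBy_append_left _ _ _ _ (fun y hy => hno 4 (by omega) y hy),
          insertBy_append_left _ _ _ _ (fun y hy => hno 3 (by omega) y hy),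
          insertBy_append_left _ _ _ _ (fun y hy => hno 2 (by omega) y hy),
          insertBy_append_left _ _ _ _ (fun y hy => hno 1 (by omega) y hy),
          PySem.List.insertBy_of_forall_not_before _ _ _ (fun y hy => hno 0 (by omega) y hy)]
    · -- x.2 = 1
      simp only [h0, List.append_assoc]; norm_num
      rw [insertBy_append_left _ _ _ _ (fun y hy => hno 5 (by omega) y hy),
          insertBy_append_left _ _ _ _ (fun y hy => hno 4 (by omega) y hy),
          insertBy_append_left _ _ _ _ (fun y hy => hno 3 (by omega) y hy),
          insertBy_append_left _ _ _ _ (fun y hy => hno 2 (by omega) y hy),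
          insertBy_append_left _ _ _ _ (fun y hy => hno 1 (by omega) y hy),
          insertBy_front _ _ _ (fun y hy => hyes 0 (by omega) y hy)]
    · -- x.2 = 2
      simp only [h0, List.append_assoc]; norm_num
      rw [insertBy_append_left _ _ _ _ (fun y hy => hno 5 (by omega) y hy),
          insertBy_append_left _ _ _ _ (fun y hy => hno 4 (by omega) y hy),
          insertBy_append_left _ _ _ _ (fun y hy => hno 3 (by omega) y hy),
          insertBy_append_left _ _ _ _ (fun y hy => hno 2 (by omega) y hy),
          insertBy_front _ _ _ (by
            intro y hy
            rcases List.mem_append.1 hy with hy | hy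
            · exact hyes 1 (by omega) y hy
            · exact hyes 0 (by omega) y hy)]
    · -- x.2 = 3
      simp only [h0, List.append_assoc]; norm_num
      rw [insertBy_append_left _ _ _ _ (fun y hy => hno 5 (by omega) y hy),
          insertBy_append_left _ _ _ _ (fun y hy => hno 4 (by omega) y hy),
          insertBy_append_left _ _ _ _ (fun y hy => hno 3 (by omega) y hy),
          insertBy_front _ _ _ (by
            intro y hy
            rcases List.mem_append.1 hy with hy | hy
            · exact hyes 2 (by omega) y hy
            rcases List.mem_append.1 hy with hy | hy
            · exact hyes 1 (by omega) y hy
            · exact hyes 0 (by omega) y hy)]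
    · -- x.2 = 4
      simp only [h0, List.append_assoc]; norm_num
      rw [insertBy_append_left _ _ _ _ (fun y hy => hno 5 (by omega) y hy),
          insertBy_append_left _ _ _ _ (fun y hy => hno 4 (by omega) y hy),
          insertBy_front _ _ _ (by
            intro y hy
            rcases List.mem_append.1 hy with hy | hy
            · exact hyes 3 (by omega) y hy
            rcases List.mem_append.1 hy with hy | hy
            · exact hyes 2 (by omega) y hy
            rcases List.mem_append.1 hy with hy | hy
            · exact hyes 1 (by omega) y hy
            · exact hyes 0 (by omega) y hy)]
    · -- x.2 = 5
      simp only [h0, List.append_assoc]; norm_num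
      rw [insertBy_append_left _ _ _ _ (fun y hy => hno 5 (by omega) y hy),
          insertBy_front _ _ _ (by
            intro y hy
            rcases List.mem_append.1 hy with hy | hy
            · exact hyes 4 (by omega) y hy
            rcases List.mem_append.1 hy with hy | hy
            · exact hyes 3 (by omega) y hy
            rcases List.mem_append.1 hy with hy | hy
            · exact hyes 2 (by omega) y hy
            rcases List.mem_append.1 hy with hy | hy
            · exact hyes 1 (by omega) y hy
            · exact hyes 0 (by omega) y hy)]

-- B's bucket loop computed: each bucket collects its filter, in input order
theorem bump_fold (score : String → Int)
    (hs : ∀ l, 0 ≤ score l ∧ score l ≤ 5) (xs : List String)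
    (a0 a1 a2 a3 a4 a5 : List String) :
    xs.foldl (fun bs link => pvBump bs (score link) link) [a0, a1, a2, a3, a4, a5]
      = [a0 ++ xs.filter (fun l => score l = 0),
         a1 ++ xs.filter (fun l => score l = 1),
         a2 ++ xs.filter (fun l => score l = 2),
         a3 ++ xs.filter (fun l => score l = 3),
         a4 ++ xs.filter (fun l => score l = 4),
         a5 ++ xs.filter (fun l => score l = 5)] := by
  induction xs generalizing a0 a1 a2 a3 a4 a5 with
  | nil => simp
  | cons l t ih =>
    have hl := hs l
    have hcase : score l = 0 ∨ score l = 1 ∨ score l = 2 ∨ score l = 3 ∨ score l = 4 ∨ score l = 5 := by omega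
    rcases hcase with h0 | h0 | h0 | h0 | h0 | h0 <;>
      simp [pvBump, h0, ih, List.append_assoc]

-- ===== VERDICT (by name: the statement is the Claim_ definition above) =====
theorem rank_profiles_spec : Claim_equal_rank_profiles := by
  intro profiles jd _
  unfold Spec_rank_profiles rank_profiles rank_profiles_alt
  dsimp only
  rw [foldl_append_map]
  rw [sort_buckets _ (by
    intro p hp
    simp only [List.nil_append, List.mem_map] at hp
    obtain ⟨l, _, rfl⟩ := hp
    exact pvScoreA_range _ l)]
  rw [bump_fold _ (fun l => by rw [pvScoreB_eq]; exact pvScoreA_range _ l)]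
  simp only [pvScoreB_eq, List.nil_append]
  simp only [pvB, List.filter_map, List.map_map, List.map_append, Function.comp_def]
  simp [List.append_assoc]
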